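-- pv_equiv track=rewrite | github.com/iTwin/imodel-native | build/BentleyBuild/bblib/utils.py | splitSources
-- ===== SOURCE A (Python) =====
-- def splitSources(inSources):
--     sources= []
--     lines = inSources.split('\n')
--     for line in lines:
--         entries = line.split(',')
--         for entry in entries:
--             entry = entry.lstrip(" ").rstrip(" ")
--             if "" != entry:
--                 sources.append (entry)
--     return sources
-- ===== SOURCE B (Python) =====
-- def splitSources(inSources):
--     # One pass over the characters: flush the current token at '\n' or ',',
--     # strip spaces only, keep non-empty tokens in order.
--     sources = []
--     cur = []
--     for ch in inSources + '\n':
--         if ch == '\n' or ch == ',':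
--             tok = ''.join(cur).strip(' ')
--             if tok:
--                 sources.append(tok)
--             cur = []
--         else:
--             cur.append(ch)
--     return sources
-- ===== Notes on version B (the rewrite author's own statement) =====
-- stated objective: alternative
-- what changed: Replaced the two nested split passes (split('\n'), then split(',') per line, then strip) with a single character-level scan that accumulates the current token and flushes it at every '\n' or ',', stripping spaces and keeping non-empty tokens.
import Mathlib
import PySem

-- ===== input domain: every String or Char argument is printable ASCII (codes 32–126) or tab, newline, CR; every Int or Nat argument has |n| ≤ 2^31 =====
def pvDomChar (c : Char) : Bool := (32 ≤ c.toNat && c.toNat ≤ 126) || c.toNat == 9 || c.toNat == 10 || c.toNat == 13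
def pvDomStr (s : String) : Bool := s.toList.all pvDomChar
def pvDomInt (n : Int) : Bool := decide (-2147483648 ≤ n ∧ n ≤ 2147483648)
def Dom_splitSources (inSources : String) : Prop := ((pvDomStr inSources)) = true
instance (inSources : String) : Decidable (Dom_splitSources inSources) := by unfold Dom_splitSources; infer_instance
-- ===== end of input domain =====

-- A splits on '\n' then on ',' with two nested loops; B makes one character-level scan
-- flushing the current token at each delimiter. Same return value; B is an alternative
-- one-pass decomposition (no speed claim).


-- ===== PORT A =====
-- entry.lstrip(" ") / .rstrip(" ") strip the single character ' ' from one side: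
-- ported exactly as dropWhile (· = ' ') on that side.
def splitSources (inSources : String) : List String :=
  let lines := PySem.Chars.splitOn inSources.toList ['\n']
  lines.foldl (fun sources line =>
    let entries := PySem.Chars.splitOn line [',']
    entries.foldl (fun sources entry =>
      let e1 := List.dropWhile (fun c => c = ' ') entry           -- entry.lstrip(" ")
      let e2 := (List.dropWhile (fun c => c = ' ') e1.reverse).reverse  -- .rstrip(" ")
      if e2 ≠ [] then sources ++ [String.mk e2] else sources) sources) []

-- ===== PORT B =====
def splitSources_alt (inSources : String) : List String :=
  let step := fun (st : List String × List Char) (ch : Char) =>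
    if ch = '\n' ∨ ch = ',' then
      let tok := PySem.Chars.stripChars st.2 [' ']                 -- ''.join(cur).strip(' ')
      (if tok ≠ [] then st.1 ++ [String.mk tok] else st.1, ([] : List Char))
    else (st.1, st.2 ++ [ch])
  ((inSources.toList ++ ['\n']).foldl step ([], [])).1

-- ===== PRECONDITION & SPEC =====
def Spec_splitSources (inSources : String) (out : List String) : Prop := out = splitSources_alt inSources
instance (inSources : String) (out : List String) : Decidable (Spec_splitSources inSources out) := by unfold Spec_splitSources; infer_instance

-- ===== CLAIM (what is proved, stated in full; the proofs are below) =====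
def Claim_equal_splitSources : Prop := ∀ (inSources : String), Dom_splitSources inSources → Spec_splitSources inSources (splitSources inSources)

-- ===== LEMMAS AND PROOFS =====

-- single-character split, the common reference form of both ports
def splitChar : List Char → Char → List (List Char)
  | [], _ => [[]]
  | c :: rest, d => if c = d then [] :: splitChar rest d else (splitChar rest d).modifyHead (c :: ·)

theorem splitChar_ne_nil (cs : List Char) (d : Char) : splitChar cs d ≠ [] := by
  induction cs with
  | nil => simp [splitChar]
  | cons c rest ih =>
    simp only [splitChar]
    split_ifs
    · simp
    · cases h : splitChar rest d with
      | nil => exact absurd h ih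
      | cons a t => simp [List.modifyHead]

theorem splitOn_go_single (d : Char) (fuel : Nat) :
    ∀ (l cur acc : List Char) (accs : List (List Char)), l.length ≤ fuel →
    PySem.Chars.splitOn.go [d] fuel l cur (accs : List (List Char)) =
      accs.reverse ++ (splitChar l d).modifyHead (cur.reverse ++ ·) := by
  induction fuel with
  | zero =>
    intro l cur acc accs hl
    have : l = [] := List.eq_nil_of_length_eq_zero (Nat.le_zero.mp hl)
    subst this
    simp [PySem.Chars.splitOn.go, splitChar, List.modifyHead]
  | succ n ih =>
    intro l cur acc accs hl
    cases l with
    | nil => simp [PySem.Chars.splitOn.go, splitChar, List.modifyHead]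
    | cons c rest =>
      simp only [List.length_cons, Nat.add_le_add_iff_right] at hl
      by_cases hcd : c = d
      · subst hcd
        have hpre : List.isPrefixOf [c] (c :: rest) = true := by simp [List.isPrefixOf]
        simp only [PySem.Chars.splitOn.go, hpre, if_pos, List.length_cons, List.length_nil,
          List.drop_succ_cons, List.drop_zero]
        rw [ih rest [] acc (cur.reverse :: accs) hl]
        simp only [splitChar, if_pos rfl, List.reverse_cons, List.reverse_nil,
          List.nil_append, List.append_assoc, List.singleton_append, List.modifyHead]
        cases splitChar rest _ <;> simp
      · have hpre : List.isPrefixOf [d] (c :: rest) = false := by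
          simp [List.isPrefixOf]; exact fun h => hcd h.symm
        simp only [PySem.Chars.splitOn.go, hpre, Bool.false_eq_true, if_false]
        rw [ih rest (c :: cur) acc accs hl]
        simp only [splitChar, if_neg hcd]
        congr 1
        cases h : splitChar rest d with
        | nil => exact absurd h (splitChar_ne_nil rest d)
        | cons a t => simp [List.modifyHead]

theorem splitOn_single (cs : List Char) (d : Char) :
    PySem.Chars.splitOn cs [d] = splitChar cs d := by
  unfold PySem.Chars.splitOn
  rw [splitOn_go_single d (cs.length + 1) cs [] [] [] (by omega)]
  cases h : splitChar cs d with
  | nil => exact absurd h (splitChar_ne_nil cs d)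
  | cons a t => simp [List.modifyHead]

-- the token stream: split on either delimiter in one pass
def tokens : List Char → List (List Char)
  | [] => [[]]
  | c :: rest => if c = '\n' ∨ c = ',' then [] :: tokens rest else (tokens rest).modifyHead (c :: ·)

theorem tokens_ne_nil (cs : List Char) : tokens cs ≠ [] := by
  induction cs with
  | nil => simp [tokens]
  | cons c rest ih =>
    simp only [tokens]
    split_ifs
    · simp
    · cases h : tokens rest with
      | nil => exact absurd h ih
      | cons a t => simp [List.modifyHead]

theorem flatMap_splitChar_tokens (cs : List Char) :
    (splitChar cs '\n').flatMap (fun l => splitChar l ',') = tokens cs := by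
  induction cs with
  | nil => simp [splitChar, tokens]
  | cons c rest ih =>
    by_cases hn : c = '\n'
    · subst hn
      have ht : tokens ('\n' :: rest) = [] :: tokens rest := by simp [tokens]
      rw [ht]
      simp only [splitChar, if_pos rfl, List.flatMap_cons]
      simpa [splitChar] using ih
    · obtain ⟨h, t, hht⟩ : ∃ h t, splitChar rest '\n' = h :: t := by
        cases hsc : splitChar rest '\n' with
        | nil => exact absurd hsc (splitChar_ne_nil rest '\n')
        | cons a b => exact ⟨a, b, rfl⟩
      by_cases hc : c = ','
      · subst hc
        simp only [splitChar, if_neg hn, hht, List.modifyHead, List.flatMap_cons,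
          if_pos rfl, tokens, true_or, if_pos]
        rw [← ih, hht, List.flatMap_cons]
        simp
      · have hd : ¬ (c = '\n' ∨ c = ',') := by tauto
        simp only [splitChar, if_neg hn, hht, List.modifyHead, List.flatMap_cons,
          if_neg hc, tokens, if_neg hd]
        rw [← ih, hht, List.flatMap_cons]
        obtain ⟨a, b, hab⟩ : ∃ a b, splitChar h ',' = a :: b := by
          cases hsc : splitChar h ',' with
          | nil => exact absurd hsc (splitChar_ne_nil h ',')
          | cons a b => exact ⟨a, b, rfl⟩
        simp [hab, List.modifyHead]

-- the common emit step: strip spaces, append if non-empty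
def emit (acc : List String) (tok : List Char) : List String :=
  let e := PySem.Chars.stripChars tok [' ']
  if e ≠ [] then acc ++ [String.mk e] else acc

theorem dropWhile_space_eq (l : List Char) :
    List.dropWhile (fun c => [' '].contains c) l = List.dropWhile (fun c => decide (c = ' ')) l := by
  congr 1
  funext c
  by_cases h : c = ' ' <;> simp [h]

theorem A_inner_eq_emit (acc : List String) (entry : List Char) :
    (let e1 := List.dropWhile (fun c => c = ' ') entry
     let e2 := (List.dropWhile (fun c => c = ' ') e1.reverse).reverse
     if e2 ≠ [] then acc ++ [String.mk e2] else acc) = emit acc entry := by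
  simp only [emit, PySem.Chars.stripChars, dropWhile_space_eq]

theorem foldl_flatMap_emit {α : Type} (ls : List (List α)) (f : List α → List (List Char))
    (acc : List String) :
    (ls.flatMap f).foldl emit acc = ls.foldl (fun a l => (f l).foldl emit a) acc := by
  induction ls generalizing acc with
  | nil => rfl
  | cons l t ih => simp [List.flatMap_cons, List.foldl_append, ih]

-- B's loop invariant
theorem B_fold_eq (cs : List Char) : ∀ (acc : List String) (cur : List Char),
    ((cs ++ ['\n']).foldl
      (fun (st : List String × List Char) (ch : Char) =>
        if ch = '\n' ∨ ch = ',' then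
          (if PySem.Chars.stripChars st.2 [' '] ≠ [] then st.1 ++ [String.mk (PySem.Chars.stripChars st.2 [' '])] else st.1, ([] : List Char))
        else (st.1, st.2 ++ [ch])) (acc, cur)).1
      = ((tokens cs).modifyHead (cur ++ ·)).foldl emit acc := by
  induction cs with
  | nil =>
    intro acc cur
    simp [tokens, List.modifyHead, emit]
  | cons c rest ih =>
    intro acc cur
    by_cases hd : c = '\n' ∨ c = ','
    · simp only [List.cons_append, List.foldl_cons, if_pos hd, ih]
      simp only [tokens, if_pos hd, List.modifyHead, List.foldl_cons, emit]
      cases h : tokens rest with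
      | nil => exact absurd h (tokens_ne_nil rest)
      | cons a t => simp [List.modifyHead]
    · simp only [List.cons_append, List.foldl_cons, if_neg hd, ih]
      simp only [tokens, if_neg hd]
      congr 1
      cases h : tokens rest with
      | nil => exact absurd h (tokens_ne_nil rest)
      | cons a t => simp [List.modifyHead]

-- ===== VERDICT (by name: the statement is the Claim_ definition above) =====
theorem splitSources_spec : Claim_equal_splitSources := by
  intro s _
  unfold Spec_splitSources splitSources splitSources_alt
  simp only [splitOn_single]
  rw [B_fold_eq s.toList [] []]
  have hmh : (tokens s.toList).modifyHead (([] : List Char) ++ ·) = tokens s.toList := by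
    cases h : tokens s.toList with
    | nil => rfl
    | cons a t => simp [List.modifyHead]
  rw [hmh, ← flatMap_splitChar_tokens, foldl_flatMap_emit]
  have he : (fun (sources : List String) (entry : List Char) =>
      let e1 := List.dropWhile (fun c => c = ' ') entry
      let e2 := (List.dropWhile (fun c => c = ' ') e1.reverse).reverse
      if e2 ≠ [] then sources ++ [String.mk e2] else sources) = emit := by
    funext acc e; exact A_inner_eq_emit acc e
  rw [he]
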